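-- pv_equiv track=rewrite | github.com/KatarinaCerne/SAT-solver-slow-loris- | sat-solver1.py | simplify_by_unit
-- ===== SOURCE A (Python) =====
-- def simplify_by_unit(prob, var):
--     formula, variables = prob
--     c_form = []
--     for clause in formula:
--         if var in clause:
--             pass
--         elif -var in clause:
--             clause.remove(-var)
--             c_form.append(clause)
--         else:
--             c_form.append(clause)
--     return c_form, variables
-- ===== SOURCE B (Python) =====
-- def simplify_by_unit(prob, var):
--     # One fused scan per clause: record whether var occurs (drop the clause)
--     # and the index of the first occurrence of -var; delete by slice-splicing.
--     # Builds new clause lists instead of mutating (return value is the same).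
--     formula, variables = prob
--     out = []
--     for clause in formula:
--         keep = True
--         neg_at = None
--         for i, lit in enumerate(clause):
--             if lit == var:
--                 keep = False
--                 break
--             if neg_at is None and lit == -var:
--                 neg_at = i
--         if keep:
--             out.append(clause if neg_at is None
--                        else clause[:neg_at] + clause[neg_at + 1:])
--     return out, variables
-- ===== Notes on version B (the rewrite author's own statement) =====
-- stated objective: alternative
-- what changed: Replaces A's per-clause membership tests plus list.remove (up to three scans of each clause and in-place mutation) by one fused indexed scan per clause that records the first index of -var and deletes it by slice-splicing into a fresh list.
import Mathlib
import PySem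

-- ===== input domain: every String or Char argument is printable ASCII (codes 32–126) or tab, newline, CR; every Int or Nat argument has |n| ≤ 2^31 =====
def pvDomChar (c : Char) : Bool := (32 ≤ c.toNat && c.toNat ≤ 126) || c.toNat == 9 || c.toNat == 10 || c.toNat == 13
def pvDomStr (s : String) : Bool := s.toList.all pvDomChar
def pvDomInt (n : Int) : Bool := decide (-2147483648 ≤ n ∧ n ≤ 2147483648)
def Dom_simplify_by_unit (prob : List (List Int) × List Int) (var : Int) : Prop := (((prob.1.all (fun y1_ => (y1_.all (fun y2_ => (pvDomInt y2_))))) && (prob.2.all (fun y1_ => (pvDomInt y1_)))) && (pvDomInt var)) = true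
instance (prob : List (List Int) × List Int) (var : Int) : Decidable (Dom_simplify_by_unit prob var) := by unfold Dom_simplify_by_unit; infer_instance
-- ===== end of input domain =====

-- B replaces A's membership tests + list.remove by one fused indexed scan per clause and a
-- slice-splice deletion; A mutates the clause lists in place, B builds new lists — the
-- theorems are about the return value only.
-- ===== PORT A =====
def simplify_by_unit (prob : List (List Int) × List Int) (var : Int) : List (List Int) × List Int :=
  let c_form := prob.1.foldl (fun acc clause =>
    if var ∈ clause then acc
    else if -var ∈ clause then acc ++ [(PySem.List.remove? clause (-var)).getD clause]
    else acc ++ [clause]) []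
  (c_form, prob.2)

-- ===== PORT B =====
-- inner indexed scan of Source B: returns none when var is found (clause dropped),
-- otherwise some negAt with negAt the first index of -var seen (None-coded as Option Nat)
def pvScan (var : Int) (clause : List Int) (i : Nat) (negAt : Option Nat) : Option (Option Nat) :=
  match clause with
  | [] => some negAt
  | lit :: rest =>
    if lit = var then none
    else pvScan var rest (i + 1) (if negAt = none ∧ lit = -var then some i else negAt)

-- clause[:k] + clause[k+1:] for 0 ≤ k ≤ len is exactly take/drop (nonnegative in-range slice)
def simplify_by_unit_alt (prob : List (List Int) × List Int) (var : Int) : List (List Int) × List Int :=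
  (prob.1.foldl (fun out clause =>
    match pvScan var clause 0 none with
    | none => out
    | some none => out ++ [clause]
    | some (some k) => out ++ [clause.take k ++ clause.drop (k + 1)]) [], prob.2)

-- ===== PRECONDITION & SPEC =====
def Spec_simplify_by_unit (prob : List (List Int) × List Int) (var : Int) (out : List (List Int) × List Int) : Prop := out = simplify_by_unit_alt prob var
instance (prob : List (List Int) × List Int) (var : Int) (out : List (List Int) × List Int) : Decidable (Spec_simplify_by_unit prob var out) := by unfold Spec_simplify_by_unit; infer_instance

-- ===== CLAIM =====
def Claim_equal_simplify_by_unit : Prop := ∀ (prob : List (List Int) × List Int) (var : Int), Dom_simplify_by_unit prob var → Spec_simplify_by_unit prob var (simplify_by_unit prob var)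

-- ===== LEMMAS AND PROOFS =====
-- first index of y in a list (proof-side characterisation of pvScan's negAt)
def pvIdx (y : Int) : List Int → Option Nat
  | [] => none
  | x :: xs => if x = y then some 0 else (pvIdx y xs).map (· + 1)

theorem pvIdx_eq_none (y : Int) (l : List Int) : pvIdx y l = none ↔ y ∉ l := by
  induction l with
  | nil => simp [pvIdx]
  | cons x xs ih =>
    by_cases h : x = y
    · simp [pvIdx, h]
    · rw [pvIdx, if_neg h]
      cases hIdx : pvIdx y xs with
      | none =>
        refine iff_of_true rfl ?_
        intro hm
        rcases List.mem_cons.mp hm with e | e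
        · exact h e.symm
        · exact ih.mp hIdx e
      | some k =>
        refine iff_of_false (by simp) ?_
        have hy : y ∈ xs := by
          by_contra hm
          rw [ih.mpr hm] at hIdx; cases hIdx
        exact fun hn => hn (List.mem_cons_of_mem _ hy)

theorem pvScan_eq (var : Int) (clause : List Int) (i : Nat) (negAt : Option Nat) :
    pvScan var clause i negAt =
      if var ∈ clause then none
      else some (match negAt with
                 | some j => some j
                 | none => (pvIdx (-var) clause).map (i + ·)) := by
  induction clause generalizing i negAt with
  | nil => cases negAt <;> simp [pvScan, pvIdx]
  | cons lit rest ih =>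
    have key : pvScan var (lit :: rest) i negAt =
        if lit = var then none
        else pvScan var rest (i + 1) (if negAt = none ∧ lit = -var then some i else negAt) := rfl
    by_cases h : lit = var
    · rw [key, if_pos h, if_pos (List.mem_cons.mpr (Or.inl h.symm))]
    · rw [key, if_neg h, ih]
      have hmem : (var ∈ lit :: rest) ↔ var ∈ rest := by
        constructor
        · intro hc
          rcases List.mem_cons.mp hc with e | e
          · exact absurd e.symm h
          · exact e
        · exact fun e => List.mem_cons_of_mem _ e
      by_cases hm : var ∈ rest
      · rw [if_pos hm, if_pos (hmem.mpr hm)]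
      · rw [if_neg hm, if_neg (fun hc => hm (hmem.mp hc))]
        cases negAt with
        | some j => rfl
        | none =>
          by_cases hneg : lit = -var
          · rw [if_pos ⟨rfl, hneg⟩]
            have hz : pvIdx (-var) (lit :: rest) = some 0 := by
              simp [pvIdx, hneg]
            rw [hz]
            simp
          · rw [if_neg (fun hc : (none : Option Nat) = none ∧ lit = -var => hneg hc.2)]
            have hc : pvIdx (-var) (lit :: rest) = (pvIdx (-var) rest).map (· + 1) := by
              rw [pvIdx, if_neg hneg]
            rw [hc]
            cases pvIdx (-var) rest with
            | none => rfl
            | some k =>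
              have hA : i + 1 + k = i + (k + 1) := by omega
              simp [hA]

theorem erase_eq_splice (y : Int) (l : List Int) (k : Nat) (h : pvIdx y l = some k) :
    l.erase y = l.take k ++ l.drop (k + 1) := by
  induction l generalizing k with
  | nil => simp [pvIdx] at h
  | cons x xs ih =>
    by_cases hx : x = y
    · simp [pvIdx, hx] at h
      subst hx; subst h
      simp [List.erase_cons_head]
    · simp [pvIdx, hx] at h
      obtain ⟨k', hk', rfl⟩ := h
      have hbe : (x == y) = false := beq_false_of_ne hx
      simp [hbe, ih k' hk', List.take_succ_cons, List.drop_succ_cons]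

theorem step_fun_eq (var : Int) :
    (fun (out : List (List Int)) (clause : List Int) =>
      match pvScan var clause 0 none with
      | none => out
      | some none => out ++ [clause]
      | some (some k) => out ++ [clause.take k ++ clause.drop (k + 1)]) =
    (fun (acc : List (List Int)) (clause : List Int) =>
      if var ∈ clause then acc
      else if -var ∈ clause then acc ++ [(PySem.List.remove? clause (-var)).getD clause]
      else acc ++ [clause]) := by
  funext out clause
  rw [pvScan_eq]
  by_cases hv : var ∈ clause
  · simp [hv]
  · by_cases hn : -var ∈ clause
    · have hidx : ∃ k, pvIdx (-var) clause = some k := by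
        cases h : pvIdx (-var) clause with
        | none => exact absurd ((pvIdx_eq_none _ _).mp h) (by simpa using hn)
        | some k => exact ⟨k, rfl⟩
      obtain ⟨k, hk⟩ := hidx
      have hrem : PySem.List.remove? clause (-var) = some (clause.erase (-var)) :=
        PySem.List.remove?_eq_some_erase clause (-var) hn
      simp [hv, hn, hk, hrem, erase_eq_splice _ _ _ hk]
    · have h0 : pvIdx (-var) clause = none := (pvIdx_eq_none _ _).mpr hn
      simp [hv, hn, h0]

-- ===== VERDICT =====
theorem simplify_by_unit_spec : Claim_equal_simplify_by_unit := by
  intro prob var _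
  unfold Spec_simplify_by_unit simplify_by_unit simplify_by_unit_alt
  rw [step_fun_eq]
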